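-- pv_equiv track=rewrite | github.com/tomertrassify/qgis-plugin | plugin_sources/max-wild/projektstarter/plugin.py | _ordered_candidates_by_type
-- ===== SOURCE A (Python) =====
-- def _ordered_candidates_by_type(candidates, topic_by_path, prefer_types):
--     prefer_rank = {}
--     if isinstance(prefer_types, list):
--         normalized = [str(t).lower() for t in prefer_types if isinstance(t, str) and t]
--         prefer_rank = {layer_type: index for index, layer_type in enumerate(normalized)}
--
--     ordered_paths = []
--     seen_paths = set()
--     for index, path in enumerate(candidates):
--         if path in seen_paths:
--             continue
--         seen_paths.add(path)
--         topic = topic_by_path.get(path)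
--         if not topic or not topic.get("__loading__", True):
--             continue
--
--         topic_type = str(topic.get("type", "ogc_wms")).lower()
--         rank = prefer_rank.get(topic_type, len(prefer_rank))
--         ordered_paths.append((rank, index, path, topic))
--
--     ordered_paths.sort(key=lambda item: (item[0], item[1]))
--     return [(path, topic) for _rank, _index, path, topic in ordered_paths]
-- ===== SOURCE B (Python) =====
-- def _ordered_candidates_by_type(candidates, topic_by_path, prefer_types):
--     # stage 1: rank table (last occurrence wins, positions counted over all kept entries)
--     ranks = {}
--     count = 0
--     if isinstance(prefer_types, list):
--         for t in prefer_types: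
--             if isinstance(t, str) and t:
--                 ranks[str(t).lower()] = count
--                 count += 1
--     default = len(ranks)
--
--     # stage 2: dedup (first occurrence) then keep only loadable entries with a topic
--     kept = []
--     for path in dict.fromkeys(candidates):
--         topic = topic_by_path.get(path)
--         if topic and topic.get("__loading__", True):
--             kept.append((path, topic))
--
--     def rank(pair):
--         return ranks.get(str(pair[1].get("type", "ogc_wms")).lower(), default)
--
--     # stage 3: concatenate the rank classes in rank order (stable within a class)
--     out = []
--     for r in range(count + 1):
--         out.extend(pair for pair in kept if rank(pair) == r)
--     return out
-- ===== Notes on version B (the rewrite author's own statement) =====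
-- stated objective: alternative
-- what changed: Replaces A's single pass that collects (rank,index,path,topic) tuples and sorts them with three staged passes: dict.fromkeys dedup, a filter pass building (path,topic) pairs, and a concatenation of rank classes selected by a filter per rank over range(count+1) - no sort and no index bookkeeping, stability by construction.
import Mathlib
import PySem

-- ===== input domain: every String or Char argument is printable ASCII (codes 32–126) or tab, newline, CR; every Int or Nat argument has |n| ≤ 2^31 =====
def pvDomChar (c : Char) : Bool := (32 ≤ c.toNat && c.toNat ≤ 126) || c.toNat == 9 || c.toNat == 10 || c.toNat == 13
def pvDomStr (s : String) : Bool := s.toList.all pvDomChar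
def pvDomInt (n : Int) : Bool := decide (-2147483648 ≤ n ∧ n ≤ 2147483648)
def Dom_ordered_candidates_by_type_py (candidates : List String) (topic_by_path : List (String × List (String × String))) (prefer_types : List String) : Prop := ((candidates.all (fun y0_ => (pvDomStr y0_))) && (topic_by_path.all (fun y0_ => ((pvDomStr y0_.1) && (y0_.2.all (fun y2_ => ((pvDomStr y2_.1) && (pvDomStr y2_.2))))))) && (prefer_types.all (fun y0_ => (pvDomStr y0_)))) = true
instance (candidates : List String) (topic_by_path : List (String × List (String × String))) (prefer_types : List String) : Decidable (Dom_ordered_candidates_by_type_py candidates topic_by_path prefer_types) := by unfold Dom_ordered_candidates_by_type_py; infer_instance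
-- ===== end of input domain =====

-- B replaces A's collect-(rank,index)-tuples-then-sort single pass by three staged passes:
-- dict.fromkeys dedup, a filter pass building (path, topic) pairs, and a concatenation of the
-- rank classes (one filter per rank over range(count+1)); same filtering and ranking, no sort.

-- first-match lookup in a dict-as-association-list parameter (Python d.get(k); exact: dict lookup)
def pvGet? {ν : Type} (d : List (String × ν)) (k : String) : Option ν :=
  (d.find? (fun p => p.1 == k)).map (·.2)

-- ===== PORT A =====
-- Python: 'not topic or not topic.get("__loading__", True)' — topic empty, or the key maps to a falsy (empty) string
def ocbtSkip (topic : List (String × String)) : Bool :=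
  (topic == []) || (match pvGet? topic "__loading__" with | some v => v == "" | none => false)

def ordered_candidates_by_type_py (candidates : List String) (topic_by_path : List (String × List (String × String))) (prefer_types : List String) : List (String × (List (String × String))) :=
  let normalized := (prefer_types.filter (fun t => !(t == ""))).map PySem.Str.lower
  let prefer_rank := (PySem.List.enumerate normalized).foldl (fun d it => d.insert it.2 it.1) (PySem.Dict.empty : PySem.Dict String Int)
  let res := (PySem.List.enumerate candidates).foldl (fun st ip =>
      if PySem.Set.contains st.2 ip.2 then st
      else
        let seen := PySem.Set.add st.2 ip.2
        match pvGet? topic_by_path ip.2 with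
        | none => (st.1, seen)
        | some topic =>
          if ocbtSkip topic then (st.1, seen)
          else
            let ttype := PySem.Str.lower ((pvGet? topic "type").getD "ogc_wms")
            let rank := prefer_rank.getD ttype (prefer_rank.size : Int)
            (st.1 ++ [(rank, ip.1, ip.2, topic)], seen))
    (([] : List (Int × Int × String × List (String × String))), ([] : PySem.Set String))
  (PySem.List.sorted2 res.1 (fun x => x.1) (fun x => x.2.1)).map (fun x => x.2.2)

-- ===== PORT B =====
-- Python: 'topic and topic.get("__loading__", True)' — the keep-condition of B's filter pass
def pvLoadable (topic : List (String × String)) : Bool :=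
  !(topic == []) && (match pvGet? topic "__loading__" with | some v => !(v == "") | none => true)

-- B's rank helper: ranks.get(str(pair[1].get("type", "ogc_wms")).lower(), default)
def pvRankOf (ranks : PySem.Dict String Int) (dflt : Int) (pair : String × List (String × String)) : Int :=
  ranks.getD (PySem.Str.lower ((pvGet? pair.2 "type").getD "ogc_wms")) dflt

def ordered_candidates_by_type_py_alt (candidates : List String) (topic_by_path : List (String × List (String × String))) (prefer_types : List String) : List (String × (List (String × String))) :=
  -- stage 1: rank table and the count of kept prefer entries
  let rc := prefer_types.foldl
    (fun st t => if t == "" then st else (st.1.insert (PySem.Str.lower t) st.2, st.2 + 1))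
    ((PySem.Dict.empty : PySem.Dict String Int), (0 : Int))
  let dflt : Int := rc.1.size
  -- stage 2: dedup (dict.fromkeys) then keep the loadable entries paired with their topic
  let kept := (PySem.List.dedup candidates).foldl
    (fun acc path =>
      match pvGet? topic_by_path path with
      | none => acc
      | some topic => if pvLoadable topic then acc ++ [(path, topic)] else acc) []
  -- stage 3: concatenate the rank classes in rank order
  (PySem.List.pyRange 0 (rc.2 + 1) 1).foldl
    (fun out r => out ++ kept.filter (fun pair => pvRankOf rc.1 dflt pair == r)) []

-- ===== PRECONDITION & SPEC =====
def Spec_ordered_candidates_by_type_py (candidates : List String) (topic_by_path : List (String × List (String × String))) (prefer_types : List String) (out : List (String × (List (String × String)))) : Prop := out = ordered_candidates_by_type_py_alt candidates topic_by_path prefer_types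
instance (candidates : List String) (topic_by_path : List (String × List (String × String))) (prefer_types : List String) (out : List (String × (List (String × String)))) : Decidable (Spec_ordered_candidates_by_type_py candidates topic_by_path prefer_types out) := by unfold Spec_ordered_candidates_by_type_py; infer_instance

-- ===== CLAIM (what is proved, stated in full; the proofs are below) =====
def Claim_equal_ordered_candidates_by_type_py : Prop := ∀ (candidates : List String) (topic_by_path : List (String × List (String × String))) (prefer_types : List String), Dom_ordered_candidates_by_type_py candidates topic_by_path prefer_types → Spec_ordered_candidates_by_type_py candidates topic_by_path prefer_types (ordered_candidates_by_type_py candidates topic_by_path prefer_types)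

-- ===== LEMMAS AND PROOFS =====

-- the tuple A's loop collects: (rank, index, path, topic)
abbrev pvTup := Int × Int × String × List (String × String)

-- A's loop body, named for the proofs (definitionally the lambda inside the port)
def pvFA (topic_by_path : List (String × List (String × String))) (prefer_rank : PySem.Dict String Int) :
    (List pvTup × PySem.Set String) → (Int × String) → (List pvTup × PySem.Set String) := fun st ip =>
  if PySem.Set.contains st.2 ip.2 then st
  else
    let seen := PySem.Set.add st.2 ip.2
    match pvGet? topic_by_path ip.2 with
    | none => (st.1, seen)
    | some topic =>
      if ocbtSkip topic then (st.1, seen)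
      else
        let ttype := PySem.Str.lower ((pvGet? topic "type").getD "ogc_wms")
        let rank := prefer_rank.getD ttype (prefer_rank.size : Int)
        (st.1 ++ [(rank, ip.1, ip.2, topic)], seen)

-- dedup of cs relative to a set of already-seen paths (first occurrences not in seen, in order)
def pvDedupFrom (seen : PySem.Set String) : List String → List String
  | [] => []
  | p :: rest =>
    if PySem.Set.contains seen p then pvDedupFrom seen rest
    else p :: pvDedupFrom (PySem.Set.add seen p) rest

-- the result of B's filter pass on a list of paths
def pvKept (tbp : List (String × List (String × String))) : List String → List (String × List (String × String))
  | [] => []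
  | p :: rest =>
    match pvGet? tbp p with
    | none => pvKept tbp rest
    | some topic => if pvLoadable topic then (p, topic) :: pvKept tbp rest else pvKept tbp rest

-- building a set by folding add is the prefix plus the relative dedup
lemma pvOfList_eq_dedupFrom (cs : List String) (s : PySem.Set String) :
    cs.foldl PySem.Set.add s = s ++ pvDedupFrom s cs := by
  induction cs generalizing s with
  | nil => simp [pvDedupFrom]
  | cons p rest ih =>
    rw [List.foldl_cons]
    by_cases h : p ∈ s
    · have hc : PySem.Set.contains s p = true := by
        rw [PySem.Set.contains_iff]; exact h
      rw [PySem.Set.add_of_mem h, pvDedupFrom, if_pos hc, ih]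
    · have hc : ¬ (PySem.Set.contains s p = true) := by
        rw [PySem.Set.contains_iff]; exact h
      rw [pvDedupFrom, if_neg hc, ih, PySem.Set.add_of_not_mem h]
      simp
  
-- B's filter pass as a fold equals pvKept
lemma pvKeptFold_eq (tbp : List (String × List (String × String))) (l : List String)
    (acc : List (String × List (String × String))) :
    l.foldl (fun acc path =>
      match pvGet? tbp path with
      | none => acc
      | some topic => if pvLoadable topic then acc ++ [(path, topic)] else acc) acc
    = acc ++ pvKept tbp l := by
  induction l generalizing acc with
  | nil => simp [pvKept]
  | cons p rest ih =>
    rw [List.foldl_cons, pvKept]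
    cases h : pvGet? tbp p with
    | none => simp only; exact ih acc
    | some topic =>
      simp only
      by_cases hl : pvLoadable topic = true
      · rw [if_pos hl, if_pos hl, ih]; simp
      · rw [if_neg hl, if_neg hl, ih]

-- the rank dictionary's values and size are bounded by the number of entries inserted
lemma pvRankDict_bound (l : List String) (s : Nat) (d : PySem.Dict String Int)
    (hs : d.size ≤ s) (hv : ∀ k v, d.get? k = some v → 0 ≤ v ∧ v < (s : Int)) :
    ((PySem.List.enumerate l (s : Int)).foldl (fun d it => d.insert it.2 it.1) d).size ≤ s + l.length ∧
      ∀ k v, ((PySem.List.enumerate l (s : Int)).foldl (fun d it => d.insert it.2 it.1) d).get? k = some v →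
        0 ≤ v ∧ v < (s : Int) + l.length := by
  induction l generalizing s d with
  | nil =>
    simp only [PySem.List.enumerate_nil, List.foldl_nil, List.length_nil]
    refine ⟨by omega, fun k v h => ?_⟩
    have := hv k v h
    constructor
    · exact this.1
    · push_cast; omega
  | cons x xs ih =>
    rw [PySem.List.enumerate_cons, List.foldl_cons]
    have h1 : ((s : Int) + 1) = ((s + 1 : Nat) : Int) := by push_cast; ring
    rw [h1]
    have := ih (s + 1) (d.insert x (s : Int))
      (by rw [PySem.Dict.size_insert]; split <;> omega)
      (by
        intro k v h
        rw [PySem.Dict.get?_insert] at h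
        split at h
        · cases h; constructor <;> push_cast <;> omega
        · have := hv k v h; constructor
          · exact this.1
          · have := this.2; push_cast; omega)
    constructor
    · have := this.1; simp only [List.length_cons]; omega
    · intro k v h
      have := this.2 k v h
      constructor
      · exact this.1
      · have := this.2; push_cast [List.length_cons] at this ⊢; omega

-- the rank looked up for any key is in [0, K] when the dictionary's values are < K and its size ≤ K
lemma pvRank_bound (d : PySem.Dict String Int) (K : Nat) (hsz : d.size ≤ K)
    (hv : ∀ k v, d.get? k = some v → 0 ≤ v ∧ v < (K : Int)) (t : String) :
    0 ≤ d.getD t (d.size : Int) ∧ d.getD t (d.size : Int) < (K : Int) + 1 := by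
  rw [PySem.Dict.getD_eq_get?_getD]
  cases h : d.get? t with
  | none => simp only [Option.getD_none]; constructor <;> omega
  | some v => have := hv t v h; simp only [Option.getD_some]; omega

-- B's stage-1 fold over prefer_types builds exactly A's enumerate-based dictionary,
-- and its counter ends at the length of A's normalized list
lemma pvRanksBuild (pts : List String) (d : PySem.Dict String Int) (c : Nat) :
    pts.foldl (fun st t => if t == "" then st else (st.1.insert (PySem.Str.lower t) st.2, st.2 + 1)) (d, (c : Int))
      = ((PySem.List.enumerate ((pts.filter (fun t => !(t == ""))).map PySem.Str.lower) (c : Int)).foldl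
          (fun d it => d.insert it.2 it.1) d,
         (c : Int) + ((pts.filter (fun t => !(t == ""))).map PySem.Str.lower).length) := by
  induction pts generalizing d c with
  | nil => simp [PySem.List.enumerate_nil]
  | cons t rest ih =>
    rw [List.foldl_cons]
    by_cases h : t = ""
    · subst h
      simp only [List.filter_cons, beq_self_eq_true, Bool.not_true]
      simpa using ih d c
    · have hb : ¬ ((t == "") = true) := by simpa using h
      rw [if_neg hb]
      have hfil : (t :: rest).filter (fun t => !(t == "")) = t :: rest.filter (fun t => !(t == "")) := by
        simp [h]
      rw [hfil, List.map_cons, PySem.List.enumerate_cons, List.foldl_cons]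
      have h1 : ((c : Int) + 1) = ((c + 1 : Nat) : Int) := by push_cast; ring
      rw [h1, ih (d.insert (PySem.Str.lower t) (c : Int)) (c + 1)]
      simp only [List.length_cons, Prod.mk.injEq]
      refine ⟨by simp, ?_⟩
      push_cast; ring

-- sorted2 is sorted with the lexicographic key
lemma pvSorted2_eq_sorted_lex {α : Type} (xs : List α) (k1 k2 : α → Int) :
    PySem.List.sorted2 xs k1 k2 = PySem.List.sorted xs (fun x => (toLex (k1 x, k2 x) : Lex (Int × Int))) := by
  rw [PySem.List.sorted_eq_foldl_insertBy]
  show List.foldl (fun acc x => PySem.List.insertBy _ x acc) [] xs = _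
  congr 1
  funext acc x
  congr 1
  funext a b
  have hiff : ((toLex (k1 a, k2 a) : Lex (Int × Int)) < toLex (k1 b, k2 b)) ↔ (k1 a < k1 b ∨ (k1 a = k1 b ∧ k2 a < k2 b)) :=
    Prod.Lex.lt_iff
  by_cases h1 : k1 a < k1 b <;> by_cases h1' : k1 b < k1 a <;> by_cases h2 : k2 a < k2 b <;>
    simp [hiff, h1, h1', h2] <;> omega

-- distributing a cons over the per-rank segments: the new head lands at the front of its own segment
lemma pvFlatMap_filter_cons {α : Type} (key : α → Int) (x : α) (xs : List α) (rs : List Nat)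
    (hcount : rs.count (key x).toNat = 1) (hx : 0 ≤ key x) :
    ((rs.flatMap (fun (r : Nat) => (x :: xs).filter (fun y => key y == (r : Int)))).Perm
      (x :: rs.flatMap (fun (r : Nat) => xs.filter (fun y => key y == (r : Int))))) := by
  induction rs with
  | nil => simp at hcount
  | cons r rs ih =>
    rw [List.flatMap_cons, List.flatMap_cons]
    by_cases hr : key x = (r : Int)
    · -- x belongs to segment r, and r occurs only here, so the later segments are unchanged
      have hrn : (key x).toNat = r := by omega
      have hc0 : rs.count (key x).toNat = 0 := by
        rw [List.count_cons] at hcount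
        rw [hrn] at hcount ⊢
        simp at hcount
        omega
      have hrest : rs.flatMap (fun (r : Nat) => (x :: xs).filter (fun y => key y == (r : Int)))
          = rs.flatMap (fun (r : Nat) => xs.filter (fun y => key y == (r : Int))) := by
        rw [List.flatMap_def, List.flatMap_def,
          List.map_congr_left (fun r' hr' => ?_)]
        have hne : ¬ (key x = (r' : Int)) := by
          intro hco
          rw [List.count_eq_zero] at hc0
          exact hc0 (show (key x).toNat ∈ rs by
            have : (key x).toNat = r' := by omega
            rw [this]; exact hr')
        simp [hne]
      rw [List.filter_cons, if_pos (by simpa using hr), hrest, List.cons_append]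
    · have hseg : (x :: xs).filter (fun y => key y == (r : Int)) = xs.filter (fun y => key y == (r : Int)) := by
        simp [hr]
      rw [hseg]
      have hcount' : rs.count (key x).toNat = 1 := by
        rw [List.count_cons] at hcount
        have hne : ¬ (r = (key x).toNat) := fun hh => hr (by omega)
        simpa [hne] using hcount
      exact ((ih hcount').append_left _).trans List.perm_middle

-- grouping by rank is a permutation of the original list
lemma pvFlatMap_filter_perm {α : Type} (l : List α) (key : α → Int) (n : Nat)
    (h : ∀ x ∈ l, 0 ≤ key x ∧ key x < (n : Int)) :
    (((List.range n).flatMap (fun (r : Nat) => l.filter (fun y => key y == (r : Int)))).Perm l) := by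
  induction l with
  | nil => simp
  | cons x xs ih =>
    have hx := h x (by simp)
    have hcount : (List.range n).count (key x).toNat = 1 := by
      rw [List.count_range, if_pos (by omega)]
    refine (pvFlatMap_filter_cons key x xs (List.range n) hcount hx.1).trans ?_
    exact List.Perm.cons x (ih (fun y hy => h y (by simp [hy])))

-- the per-rank segments, concatenated in rank order, are lexicographically strictly increasing
lemma pvFlatMap_filter_pairwise (l : List pvTup) (n : Nat)
    (hpair : l.Pairwise (fun a b => a.2.1 < b.2.1)) :
    List.Pairwise (fun a b : pvTup => (toLex (a.1, a.2.1) : Lex (Int × Int)) < toLex (b.1, b.2.1))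
      ((List.range n).flatMap (fun (r : Nat) => l.filter (fun y => y.1 == (r : Int)))) := by
  rw [List.flatMap_def, List.pairwise_flatten]
  constructor
  · intro seg hseg
    rw [List.mem_map] at hseg
    obtain ⟨r, _, rfl⟩ := hseg
    rw [List.pairwise_filter]
    refine hpair.imp_of_mem ?_
    intro a b _ _ hab ha hb
    rw [beq_iff_eq] at ha hb
    rw [Prod.Lex.lt_iff]
    right
    refine ⟨?_, hab⟩
    show a.1 = b.1
    rw [ha, hb]
  · rw [List.pairwise_map]
    refine (List.pairwise_lt_range).imp_of_mem ?_
    intro r1 r2 _ _ hlt a ha b hb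
    rw [List.mem_filter, beq_iff_eq] at ha hb
    rw [Prod.Lex.lt_iff]
    left
    show a.1 < b.1
    rw [ha.2, hb.2]
    exact_mod_cast hlt

-- B's keep-condition is the negation of A's skip-condition
lemma pvLoadable_eq (t : List (String × String)) : pvLoadable t = !(ocbtSkip t) := by
  unfold pvLoadable ocbtSkip
  cases pvGet? t "__loading__" <;> simp [Bool.not_or]

-- characterization of A's loop: its projected accumulator is B's pvKept of the relative dedup,
-- every stored rank is B's recomputed rank, and the stored indices are strictly increasing
lemma pvALoop (tbp : List (String × List (String × String))) (D : PySem.Dict String Int)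
    (cs : List String) (i : Int) (acc : List pvTup) (seen : PySem.Set String)
    (hrk : ∀ x ∈ acc, x.1 = pvRankOf D (D.size : Int) x.2.2)
    (hidx : ∀ x ∈ acc, x.2.1 < i)
    (hpair : acc.Pairwise (fun a b => a.2.1 < b.2.1)) :
    (((PySem.List.enumerate cs i).foldl (pvFA tbp D) (acc, seen)).1.map (fun x => x.2.2)
        = acc.map (fun x => x.2.2) ++ pvKept tbp (pvDedupFrom seen cs)) ∧
      (∀ x ∈ ((PySem.List.enumerate cs i).foldl (pvFA tbp D) (acc, seen)).1, x.1 = pvRankOf D (D.size : Int) x.2.2) ∧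
      ((PySem.List.enumerate cs i).foldl (pvFA tbp D) (acc, seen)).1.Pairwise (fun a b => a.2.1 < b.2.1) := by
  induction cs generalizing i acc seen with
  | nil =>
    refine ⟨?_, hrk, hpair⟩
    simp [PySem.List.enumerate_nil, pvDedupFrom, pvKept]
  | cons p cs ih =>
    rw [PySem.List.enumerate_cons, List.foldl_cons]
    by_cases hseen : p ∈ seen
    · have hseenb : PySem.Set.contains seen p = true := by
        rw [PySem.Set.contains_iff]; exact hseen
      have hA : pvFA tbp D (acc, seen) (i, p) = (acc, seen) := by simp [pvFA, hseen]
      rw [hA, pvDedupFrom, if_pos hseenb]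
      exact ih (i + 1) acc seen hrk (fun x hx => by have := hidx x hx; omega) hpair
    · have hseenb : ¬ (PySem.Set.contains seen p = true) := by
        rw [PySem.Set.contains_iff]; exact hseen
      rw [pvDedupFrom, if_neg hseenb]
      cases hT : pvGet? tbp p with
      | none =>
        have hA : pvFA tbp D (acc, seen) (i, p) = (acc, PySem.Set.add seen p) := by
          simp [pvFA, hseen, hT]
        rw [hA, pvKept]
        simp only [hT]
        exact ih (i + 1) acc (PySem.Set.add seen p) hrk (fun x hx => by have := hidx x hx; omega) hpair
      | some topic =>
        by_cases hskip : ocbtSkip topic = true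
        · have hA : pvFA tbp D (acc, seen) (i, p) = (acc, PySem.Set.add seen p) := by
            simp [pvFA, hseen, hT, hskip]
          have hload : ¬ (pvLoadable topic = true) := by
            rw [pvLoadable_eq, hskip]; simp
          rw [hA, pvKept]
          simp only [hT, if_neg hload]
          exact ih (i + 1) acc (PySem.Set.add seen p) hrk (fun x hx => by have := hidx x hx; omega) hpair
        · set R := D.getD (PySem.Str.lower ((pvGet? topic "type").getD "ogc_wms")) (D.size : Int) with hRdef
          have hA : pvFA tbp D (acc, seen) (i, p)
              = (acc ++ [(R, i, p, topic)], PySem.Set.add seen p) := by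
            simp [pvFA, hseen, hT, hskip, hRdef]
          have hload : pvLoadable topic = true := by
            simp [pvLoadable_eq, hskip]
          rw [hA, pvKept]
          simp only [hT, if_pos hload]
          have hstep := ih (i + 1) (acc ++ [(R, i, p, topic)]) (PySem.Set.add seen p)
            (by
              intro x hx
              rcases List.mem_append.1 hx with h | h
              · exact hrk x h
              · simp at h; subst h
                simp [pvRankOf, hRdef])
            (by
              intro x hx
              rcases List.mem_append.1 hx with h | h
              · have := hidx x h; omega
              · simp at h; subst h; simp)
            (by
              rw [List.pairwise_append]
              refine ⟨hpair, by simp, ?_⟩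
              intro a ha b hb
              simp at hb
              subst hb
              simpa using hidx a ha)
          refine ⟨?_, hstep.2.1, hstep.2.2⟩
          rw [hstep.1]
          simp

-- ===== VERDICT (by name: the statement is the Claim_ definition above) =====
theorem ordered_candidates_by_type_py_spec : Claim_equal_ordered_candidates_by_type_py := by
  intro candidates topic_by_path prefer_types _hdom
  unfold Spec_ordered_candidates_by_type_py
  -- shared quantities
  set N := ((prefer_types.filter (fun t => !(t == ""))).map PySem.Str.lower) with hN
  set D := ((PySem.List.enumerate N).foldl (fun d it => d.insert it.2 it.1) (PySem.Dict.empty : PySem.Dict String Int)) with hDdef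
  set K := N.length with hK
  have hdict := pvRankDict_bound N 0 PySem.Dict.empty (by simp) (by intro k v h; simp [PySem.Dict.get?_empty] at h)
  have hD : ∀ t, 0 ≤ D.getD t (D.size : Int) ∧ D.getD t (D.size : Int) < (K : Int) + 1 := by
    intro t
    apply pvRank_bound
    · have := hdict.1; simpa using this
    · intro k v h
      have := hdict.2 k v (by simpa using h)
      simpa using this
  -- B's stage 1 builds (D, K)
  have hrc : prefer_types.foldl
      (fun st t => if t == "" then st else (st.1.insert (PySem.Str.lower t) st.2, st.2 + 1))
      ((PySem.Dict.empty : PySem.Dict String Int), (0 : Int)) = (D, (K : Int)) := by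
    have h0 := pvRanksBuild prefer_types PySem.Dict.empty 0
    simp only [Nat.cast_zero, zero_add] at h0
    rw [h0]
  -- A's loop characterized
  have hA := pvALoop topic_by_path D candidates 0 [] [] (by simp) (by simp) (by simp)
  set acc := (((PySem.List.enumerate candidates 0).foldl (pvFA topic_by_path D) ([], [])).1) with hacc
  obtain ⟨hmap, hrkF, hpairF⟩ := hA
  simp only [List.map_nil, List.nil_append] at hmap
  -- B's dedup is the relative dedup from the empty seen-set
  have hded : PySem.List.dedup candidates = pvDedupFrom [] candidates := by
    rw [PySem.List.dedup_eq_ofList, PySem.Set.ofList_eq_foldl, pvOfList_eq_dedupFrom]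
    simp
  -- both sides
  have hAeq : ordered_candidates_by_type_py candidates topic_by_path prefer_types
      = (PySem.List.sorted2 acc (fun x => x.1) (fun x => x.2.1)).map (fun x => x.2.2) := rfl
  have hBeq : ordered_candidates_by_type_py_alt candidates topic_by_path prefer_types
      = (PySem.List.pyRange 0 ((K : Int) + 1) 1).foldl
          (fun out r => out ++ (pvKept topic_by_path (pvDedupFrom [] candidates)).filter
            (fun pair => pvRankOf D (D.size : Int) pair == r)) [] := by
    show (let rc := prefer_types.foldl
            (fun st t => if t == "" then st else (st.1.insert (PySem.Str.lower t) st.2, st.2 + 1))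
            ((PySem.Dict.empty : PySem.Dict String Int), (0 : Int))
          let dflt : Int := rc.1.size
          let kept := (PySem.List.dedup candidates).foldl
            (fun acc path =>
              match pvGet? topic_by_path path with
              | none => acc
              | some topic => if pvLoadable topic then acc ++ [(path, topic)] else acc) []
          (PySem.List.pyRange 0 (rc.2 + 1) 1).foldl
            (fun out r => out ++ kept.filter (fun pair => pvRankOf rc.1 dflt pair == r)) []) = _
    rw [hrc]
    simp only
    rw [hded, pvKeptFold_eq]
    simp
  rw [hAeq, hBeq]
  -- A: the sort is the concatenation of the rank classes
  have hranks : ∀ x ∈ acc, 0 ≤ x.1 ∧ x.1 < ((K + 1 : Nat) : Int) := by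
    intro x hx
    have h1 := hrkF x hx
    have h2 := hD (PySem.Str.lower ((pvGet? x.2.2.2 "type").getD "ogc_wms"))
    rw [h1]
    unfold pvRankOf
    push_cast
    omega
  have hsorted : PySem.List.sorted2 acc (fun x => x.1) (fun x => x.2.1)
      = (List.range (K + 1)).flatMap (fun (r : Nat) => acc.filter (fun x => x.1 == (r : Int))) := by
    rw [pvSorted2_eq_sorted_lex]
    apply PySem.List.sorted_eq_of_perm_of_pairwise_lt
    · exact pvFlatMap_filter_perm acc (fun x => x.1) (K + 1)
        (fun x hx => by have := hranks x hx; push_cast at this ⊢; omega)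
    · exact pvFlatMap_filter_pairwise acc (K + 1) hpairF
  rw [hsorted, List.map_flatMap]
  -- B: the range loop is a flatMap over List.range
  rw [PySem.List.foldl_append_eq_flatMap]
  have hpy : PySem.List.pyRange 0 ((K : Int) + 1) 1 = (List.range (K + 1)).map (fun (r : Nat) => (r : Int)) := by
    have := PySem.List.pyRange_zero_natCast (K + 1)
    push_cast at this ⊢
    rw [← this]
  rw [hpy, List.flatMap_map]
  simp only [List.nil_append]
  -- segmentwise equality: each rank class of acc, projected, is the rank-r filter of kept
  have hseg : ∀ r : Nat, (acc.filter (fun x => x.1 == (r : Int))).map (fun x => x.2.2)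
      = (pvKept topic_by_path (pvDedupFrom [] candidates)).filter
          (fun pair => pvRankOf D (D.size : Int) pair == (r : Int)) := by
    intro r
    rw [← hmap, List.filter_map]
    have : acc.filter (fun x => x.1 == (r : Int))
        = acc.filter ((fun pair => pvRankOf D (D.size : Int) pair == (r : Int)) ∘ (fun x => x.2.2)) := by
      apply List.filter_congr
      intro x hx
      simp only [Function.comp]
      rw [hrkF x hx]
    rw [this]
  simp only [List.flatMap_def]
  exact congrArg List.flatten (List.map_congr_left (fun r _ => hseg r))
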